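-- pv_equiv track=rewrite | github.com/psy1088/Algorithm | Programmers/메뉴 리뉴얼.py | check
-- ===== SOURCE A (Python) =====
-- def check(dict):
--     arr = []
--     if not dict:
--         return arr
--     else:
--         max_val = max(list(dict.values()))
--         if max_val < 2:
--             return arr
--
--         for d in dict:
--             if dict[d] == max_val:
--                 arr.append(''.join(d))
--     return arr
-- ===== SOURCE B (Python) =====
-- def check(dict):
--     # Group joined keys by their value, then look up the max-valued group.
--     table = {}
--     for k, v in dict.items():
--         table.setdefault(v, []).append(''.join(k))
--     if not table:
--         return []
--     m = max(table)
--     return table[m] if m >= 2 else []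
-- ===== Notes on version B (the rewrite author's own statement) =====
-- stated objective: alternative
-- what changed: B makes one grouping pass building a value->joined-keys table and returns the table entry of the max value-key, instead of A's max-over-values followed by a re-scan with a per-key dict lookup.
import Mathlib
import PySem

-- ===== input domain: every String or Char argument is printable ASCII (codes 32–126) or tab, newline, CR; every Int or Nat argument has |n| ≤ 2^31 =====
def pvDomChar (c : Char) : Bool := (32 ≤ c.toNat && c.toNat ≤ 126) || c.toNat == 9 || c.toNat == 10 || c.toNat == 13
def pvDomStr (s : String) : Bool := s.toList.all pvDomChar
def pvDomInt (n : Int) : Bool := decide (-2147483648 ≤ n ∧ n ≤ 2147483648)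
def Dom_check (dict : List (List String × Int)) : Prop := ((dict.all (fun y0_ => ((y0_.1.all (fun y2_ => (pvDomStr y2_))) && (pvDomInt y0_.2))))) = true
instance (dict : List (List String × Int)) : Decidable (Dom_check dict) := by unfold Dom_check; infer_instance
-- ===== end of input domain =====

-- B changes the decomposition: one grouping pass building a value -> joined-keys table, then one lookup at the max value-key, instead of A's max-over-values followed by a re-filtering scan (same cost; objective: alternative).

-- ===== PORT A =====
def check (dict : List (List String × Int)) : List String :=
  let d := PySem.Dict.ofList dict
  if dict = [] then []
  else
    match PySem.List.max? d.values (fun x => x) with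
    | none => []   -- unreachable: 'if not dict' guards the max
    | some max_val =>
      if max_val < 2 then []
      else
        d.keys.foldl (fun arr k =>
          if d.get? k == some max_val then arr ++ [PySem.Str.join "" k] else arr) []

-- ===== PORT B =====
def check_alt (dict : List (List String × Int)) : List String :=
  let d := PySem.Dict.ofList dict
  let table := d.items.foldl
    (fun t kv => t.modify kv.2 [] (fun vs => vs ++ [PySem.Str.join "" kv.1]))
    (PySem.Dict.empty : PySem.Dict Int (List String))
  if table.items = [] then []
  else
    match PySem.List.max? table.keys (fun x => x) with
    | none => []   -- unreachable: the table is nonempty here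
    | some m =>
      if 2 ≤ m then table.getD m [] else []

-- ===== PRECONDITION & SPEC =====
def Spec_check (dict : List (List String × Int)) (out : List String) : Prop := out = check_alt dict
instance (dict : List (List String × Int)) (out : List String) : Decidable (Spec_check dict out) := by unfold Spec_check; infer_instance

-- ===== CLAIM (what is proved, stated in full; the proofs are below) =====
def Claim_equal_check : Prop := ∀ (dict : List (List String × Int)), Dom_check dict → Spec_check dict (check dict)

-- ===== LEMMAS AND PROOFS =====

-- Python's max over two Int lists with the same elements is the same.
theorem pvMaxCongr (l l' : List Int) (h : ∀ x, x ∈ l ↔ x ∈ l') :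
    PySem.List.max? l (fun x => x) = PySem.List.max? l' (fun x => x) := by
  cases h1 : PySem.List.max? l (fun x => x) with
  | none =>
    cases h2 : PySem.List.max? l' (fun x => x) with
    | none => rfl
    | some m =>
      have hm := PySem.List.max?_mem h2
      rw [PySem.List.max?_eq_none_iff] at h1
      subst h1
      exact absurd ((h m).mpr hm) (by simp)
  | some m =>
    cases h2 : PySem.List.max? l' (fun x => x) with
    | none =>
      have hm := PySem.List.max?_mem h1
      rw [PySem.List.max?_eq_none_iff] at h2
      subst h2
      exact absurd ((h m).mp hm) (by simp)
    | some m' =>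
      have hm := PySem.List.max?_mem h1
      have hm' := PySem.List.max?_mem h2
      have h1' := PySem.List.max?_isMax h1
      have h2' := PySem.List.max?_isMax h2
      have : m = m' := le_antisymm (h2' m ((h m).mp hm)) (h1' m' ((h m').mpr hm'))
      simp [this]

-- ===== VERDICT (by name: the statement is the Claim_ definition above) =====
theorem check_spec : Claim_equal_check := by
  intro dict _
  unfold Spec_check check check_alt
  simp only []
  set d := PySem.Dict.ofList dict with hd
  have hnd : d.keys.Nodup := PySem.Dict.nodup_keys_ofList dict
  set table := d.items.foldl
    (fun t kv => t.modify kv.2 [] (fun vs => vs ++ [PySem.Str.join "" kv.1]))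
    (PySem.Dict.empty : PySem.Dict Int (List String)) with htab
  have hkeys : table.keys = PySem.Set.ofList (d.items.map (·.2)) := by
    rw [htab, PySem.Dict.keys_foldl_modify_key]
    simp [PySem.Set.update_nil_left]
  have hmemk : ∀ x, x ∈ table.keys ↔ x ∈ d.items.map (·.2) := by
    intro x; rw [hkeys]; exact PySem.Set.mem_ofList (y := x) (xs := d.items.map (·.2))
  have hvals : d.values = d.items.map (·.2) := rfl
  have hmax : PySem.List.max? table.keys (fun x => x)
      = PySem.List.max? d.values (fun x => x) := by
    rw [hvals]; exact pvMaxCongr _ _ hmemk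
  by_cases hD : dict = []
  · subst hD; decide
  · simp only [if_neg hD]
    cases hmv : PySem.List.max? d.values (fun x => x) with
    | none =>
      rw [PySem.List.max?_eq_none_iff, hvals, List.map_eq_nil_iff] at hmv
      have : table.items = [] := by rw [htab, hmv]; rfl
      simp [this]
    | some m =>
      have hmk : PySem.List.max? table.keys (fun x => x) = some m := by rw [hmax, hmv]
      have hmem : m ∈ table.keys := PySem.List.max?_mem hmk
      have hne : table.items ≠ [] := by
        intro h0
        have : table.keys = [] := by
          show table.items.map (·.1) = []
          rw [h0]; rfl
        rw [this] at hmem; exact absurd hmem (by simp)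
      rw [if_neg hne, hmk]
      dsimp only
      by_cases hm2 : m < 2
      · rw [if_pos hm2, if_neg (by omega)]
      · rw [if_neg hm2, if_pos (by omega)]
        -- A's loop = B's table lookup
        have hA : d.keys.foldl (fun arr k =>
            if d.get? k == some m then arr ++ [PySem.Str.join "" k] else arr) []
            = (d.items.filter (fun kv => kv.2 == m)).map (fun kv => PySem.Str.join "" kv.1) := by
          rw [PySem.List.foldl_append_if]
          show [] ++ ((d.items.map (·.1)).filter _).map _ = _
          rw [List.nil_append, List.filter_map, List.map_map]
          congr 1
          apply List.filter_congr
          intro kv hkv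
          obtain ⟨k, v⟩ := kv
          have := PySem.Dict.get?_of_mem_items (d := d) hkv hnd
          simp [Function.comp, this]
        have hB : table.getD m [] =
            (d.items.filter (fun kv => kv.2 == m)).map (fun kv => PySem.Str.join "" kv.1) := by
          rw [htab, ← List.foldl_map (f := fun kv : List String × Int => (kv.2, PySem.Str.join "" kv.1))
            (g := fun (t : PySem.Dict Int (List String)) p => t.modify p.1 [] (fun vs => vs ++ [p.2]))]
          rw [PySem.Dict.getD_foldl_modify_append]
          rw [PySem.Dict.getD_empty, List.nil_append, List.filter_map, List.map_map]
          rfl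
        rw [hA, hB]
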